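-- pv_equiv track=rewrite | github.com/redraccoonz/VR-Interview-11-21-22 | parsebigbox.py | find_max_coverage
-- ===== SOURCE A (Python) =====
-- from itertools import combinations
--
-- def find_max_coverage(datacenter_to_user_id, datacenter_list, group_size):
--     max_user_count = 0
--     best_datacenter_group = None
--     for datacenter_group in combinations(datacenter_list, group_size):
--         user_set = set()
--         for datacenter in datacenter_group:
--             user_set = user_set.union(datacenter_to_user_id[datacenter])
--         user_count = len(user_set)
--         if user_count > max_user_count:
--             max_user_count = user_count
--             best_datacenter_group = datacenter_group
--     return max_user_count, best_datacenter_group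
-- ===== SOURCE B (Python) =====
-- def find_max_coverage(datacenter_to_user_id, datacenter_list, group_size):
--     # Explicit-stack include/exclude DFS over the datacenter list, threading the
--     # running union and the chosen prefix; visits groups in the same lexicographic
--     # order as itertools.combinations and keeps the first maximum (strict >).
--     # Branches that cannot be completed (fewer candidates left than needed) are pruned.
--     cands = list(datacenter_list)
--     best = (0, None)
--     stack = [(0, group_size, set(), ())]
--     while stack:
--         i, k, union, chosen = stack.pop()
--         if k == 0:
--             count = len(union)
--             if count > best[0]:
--                 best = (count, chosen)
--             continue
--         if k < 0 or k > len(cands) - i: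
--             continue
--         x = cands[i]
--         # exclude x (visited second), then include x (popped first)
--         stack.append((i + 1, k, union, chosen))
--         stack.append((i + 1, k - 1, union | set(datacenter_to_user_id[x]), chosen + (x,)))
--     return best
-- ===== Notes on version B (the rewrite author's own statement) =====
-- stated objective: alternative
-- what changed: Replaces the flat itertools.combinations loop (which rebuilds each group's user set from scratch) with an explicit-stack include/exclude DFS over the datacenter list that threads the running union and chosen prefix as accumulators, prunes branches with too few candidates left, and reuses partial unions shared by sibling groups.
import Mathlib
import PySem

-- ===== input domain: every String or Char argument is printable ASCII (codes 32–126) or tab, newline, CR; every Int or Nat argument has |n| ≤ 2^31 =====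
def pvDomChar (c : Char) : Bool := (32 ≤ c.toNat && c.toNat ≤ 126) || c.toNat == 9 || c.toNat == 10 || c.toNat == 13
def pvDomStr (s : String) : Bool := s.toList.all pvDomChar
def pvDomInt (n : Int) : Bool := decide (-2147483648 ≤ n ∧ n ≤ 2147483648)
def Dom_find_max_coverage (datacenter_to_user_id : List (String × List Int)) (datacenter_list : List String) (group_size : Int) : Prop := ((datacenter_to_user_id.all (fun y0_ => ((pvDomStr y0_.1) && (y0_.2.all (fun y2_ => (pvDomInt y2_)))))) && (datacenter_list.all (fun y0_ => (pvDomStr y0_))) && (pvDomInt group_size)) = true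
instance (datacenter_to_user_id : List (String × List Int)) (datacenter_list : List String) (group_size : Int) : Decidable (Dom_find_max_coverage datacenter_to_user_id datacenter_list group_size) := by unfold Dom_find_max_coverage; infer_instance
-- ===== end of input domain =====

-- B replaces the flat combinations loop by an explicit-stack include/exclude DFS that
-- threads the running union and prunes branches with too few candidates left;
-- objective: alternative decomposition of the same cost.

-- ===== PORT A =====
-- itertools.combinations(xs, k), in lexicographic order of positions
def pyCombs (k : Nat) (xs : List String) : List (List String) :=
  match k, xs with
  | 0, _ => [[]]
  | _ + 1, [] => []
  | k + 1, x :: rest => (pyCombs k rest).map (fun g => x :: g) ++ pyCombs (k + 1) rest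

def find_max_coverage (datacenter_to_user_id : List (String × List Int)) (datacenter_list : List String) (group_size : Int) : Int × Option (List String) :=
  (pyCombs group_size.toNat datacenter_list).foldl
    (fun best datacenter_group =>
      let user_set : PySem.Set Int :=
        datacenter_group.foldl
          (fun s d => PySem.Set.union s (PySem.Dict.getD (PySem.Dict.mk datacenter_to_user_id) d ([] : List Int)))
          PySem.Set.empty
      let user_count := PySem.Set.len user_set
      if user_count > best.1 then (user_count, some datacenter_group) else best)
    ((0 : Int), (none : Option (List String)))

-- ===== PORT B =====
-- a stack frame (i, k, union, chosen); i is a Nat (it starts at 0 and is only incremented)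
-- the while-loop over the explicit stack (head of the list = top of the stack)
def loopAlt (datacenter_to_user_id : List (String × List Int)) (cands : List String) :
    List (Nat × Int × PySem.Set Int × List String) → Int × Option (List String) → Int × Option (List String)
  | [], best => best
  | (i, k, union, chosen) :: st, best =>
    if k = 0 then
      let count := PySem.Set.len union
      loopAlt datacenter_to_user_id cands st (if count > best.1 then (count, some chosen) else best)
    else if k < 0 ∨ (cands.length : Int) - (i : Int) < k then
      loopAlt datacenter_to_user_id cands st best
    else
      let x := cands.getD i ""
      loopAlt datacenter_to_user_id cands
        ((i + 1, k - 1, PySem.Set.union union (PySem.Dict.getD (PySem.Dict.mk datacenter_to_user_id) x ([] : List Int)), chosen ++ [x]) ::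
          (i + 1, k, union, chosen) :: st) best
  termination_by st => (st.map (fun f => 3 ^ (cands.length - f.1))).sum
  decreasing_by
  · simp only [List.map_cons, List.sum_cons]
    have : 0 < 3 ^ (cands.length - i) := pow_pos (by norm_num) _
    omega
  · simp only [List.map_cons, List.sum_cons]
    have : 0 < 3 ^ (cands.length - i) := pow_pos (by norm_num) _
    omega
  · rename_i hk hp
    simp only [List.map_cons, List.sum_cons]
    have hi : i < cands.length := by omega
    have h1 : cands.length - i = (cands.length - (i + 1)) + 1 := by omega
    have h2 : 3 ^ (cands.length - i) = 3 * 3 ^ (cands.length - (i + 1)) := by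
      rw [h1, pow_succ]; ring
    have : 0 < 3 ^ (cands.length - (i + 1)) := pow_pos (by norm_num) _
    omega

def find_max_coverage_alt (datacenter_to_user_id : List (String × List Int)) (datacenter_list : List String) (group_size : Int) : Int × Option (List String) :=
  loopAlt datacenter_to_user_id datacenter_list
    [(0, group_size, PySem.Set.empty, [])] ((0 : Int), (none : Option (List String)))

-- ===== PRECONDITION & SPEC =====
-- Pre_ excludes exactly the inputs where Python A raises: a negative group_size
-- (ValueError from combinations) and a datacenter_list containing a string that is
-- not a key of the dict while 1 ≤ group_size ≤ len(datacenter_list) (KeyError).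
def Pre_find_max_coverage (datacenter_to_user_id : List (String × List Int)) (datacenter_list : List String) (group_size : Int) : Prop :=
  0 ≤ group_size ∧
    (group_size = 0 ∨ (datacenter_list.length : Int) < group_size ∨
      ∀ d ∈ datacenter_list, d ∈ datacenter_to_user_id.map Prod.fst)
instance (datacenter_to_user_id : List (String × List Int)) (datacenter_list : List String) (group_size : Int) : Decidable (Pre_find_max_coverage datacenter_to_user_id datacenter_list group_size) := by unfold Pre_find_max_coverage; infer_instance

def pvWitness_find_max_coverage : (List (String × List Int)) × List String × Int :=
  ([("a", [1, 2]), ("b", [2, 3])], ["a", "b"], 1)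

def Spec_find_max_coverage (datacenter_to_user_id : List (String × List Int)) (datacenter_list : List String) (group_size : Int) (out : Int × Option (List String)) : Prop := out = find_max_coverage_alt datacenter_to_user_id datacenter_list group_size
instance (datacenter_to_user_id : List (String × List Int)) (datacenter_list : List String) (group_size : Int) (out : Int × Option (List String)) : Decidable (Spec_find_max_coverage datacenter_to_user_id datacenter_list group_size out) := by unfold Spec_find_max_coverage; infer_instance

-- ===== CLAIM (what is proved, stated in full; the proofs are below) =====
def Claim_equal_find_max_coverage : Prop := ∀ (datacenter_to_user_id : List (String × List Int)) (datacenter_list : List String) (group_size : Int), Dom_find_max_coverage datacenter_to_user_id datacenter_list group_size → Pre_find_max_coverage datacenter_to_user_id datacenter_list group_size → Spec_find_max_coverage datacenter_to_user_id datacenter_list group_size (find_max_coverage datacenter_to_user_id datacenter_list group_size)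

-- ===== LEMMAS AND PROOFS =====

-- proof-side helper: the recursive include/exclude DFS a single stack frame performs
def dfsRec (dict : List (String × List Int)) :
    List String → Int → PySem.Set Int → List String → Int × Option (List String) → Int × Option (List String)
  | cands, k, union, chosen, best =>
    if k = 0 then
      let count := PySem.Set.len union
      if count > best.1 then (count, some chosen) else best
    else
      match cands with
      | [] => best
      | x :: rest =>
        let best1 := dfsRec dict rest (k - 1)
          (PySem.Set.union union (PySem.Dict.getD (PySem.Dict.mk dict) x ([] : List Int))) (chosen ++ [x]) best
        dfsRec dict rest k union chosen best1

-- a frame asking for more elements than remain contributes nothing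
theorem dfsRec_big (dict : List (String × List Int)) :
    ∀ (cands : List String) (k : Int) (union : PySem.Set Int) (chosen : List String)
      (best : Int × Option (List String)), k ≠ 0 → (k < 0 ∨ (cands.length : Int) < k) →
      dfsRec dict cands k union chosen best = best := by
  intro cands
  induction cands with
  | nil =>
    intro k union chosen best hk _
    rw [dfsRec]
    simp [hk]
  | cons x rest ih =>
    intro k union chosen best hk hbig
    rw [dfsRec]
    simp only [hk, if_false]
    have hlen : ((x :: rest).length : Int) = (rest.length : Int) + 1 := by simp
    rw [ih (k - 1) _ _ _ (by omega) (by rw [hlen] at hbig; omega),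
        ih k _ _ _ hk (by rw [hlen] at hbig; omega)]

-- the stack loop folds dfsRec over its frames (frame (i,k,u,c) acts on the suffix cands.drop i)
theorem loopAlt_eq_foldl (dict : List (String × List Int)) (cands : List String) :
    ∀ (st : List (Nat × Int × PySem.Set Int × List String)) (best : Int × Option (List String)),
      loopAlt dict cands st best =
        st.foldl (fun b f => dfsRec dict (cands.drop f.1) f.2.1 f.2.2.1 f.2.2.2 b) best := by
  intro st best
  induction st, best using loopAlt.induct dict cands with
  | case1 best => simp [loopAlt]
  | case2 i union chosen st best count ih =>
    rw [loopAlt]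
    simp only [List.foldl_cons]
    rw [dfsRec.eq_def]
    simp only [dite_eq_ite] at ih
    simpa using ih
  | case3 i k union chosen st best hk hi ih =>
    rw [loopAlt]
    simp only [if_neg hk, if_pos hi, List.foldl_cons, ih]
    rw [dfsRec_big dict _ k union chosen best hk (by rw [List.length_drop]; omega)]
  | case4 i k union chosen st best hk hi x ih =>
    rw [loopAlt]
    simp only [if_neg hk, if_neg hi]
    rw [ih]
    simp only [List.foldl_cons]
    have hlt : i < cands.length := by omega
    have hdrop : cands.drop i = cands.getD i "" :: cands.drop (i + 1) := by
      rw [List.getD_eq_getElem cands "" hlt, List.drop_eq_getElem_cons hlt]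
    rw [hdrop, dfsRec]
    simp only [hk, if_false]
    rfl

-- dfsRec = fold of A's update step over the combinations, with the union/prefix accumulators factored out
theorem dfsRec_eq_foldl (dict : List (String × List Int)) :
    ∀ (cands : List String) (k : Nat) (union : PySem.Set Int) (chosen : List String)
      (best : Int × Option (List String)),
      dfsRec dict cands (k : Int) union chosen best =
        (pyCombs k cands).foldl
          (fun b g =>
            let s := g.foldl (fun s d => PySem.Set.union s (PySem.Dict.getD (PySem.Dict.mk dict) d ([] : List Int))) union
            let c := PySem.Set.len s
            if c > b.1 then (c, some (chosen ++ g)) else b)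
          best := by
  intro cands
  induction cands with
  | nil =>
    intro k union chosen best
    cases k with
    | zero => simp [dfsRec, pyCombs]
    | succ j =>
      have hk : ((j : Int) + 1) ≠ 0 := by omega
      rw [dfsRec]
      simp [pyCombs, hk]
  | cons x rest ih =>
    intro k union chosen best
    cases k with
    | zero => simp [dfsRec, pyCombs]
    | succ j =>
      have hk : ((j : Int) + 1) ≠ 0 := by omega
      rw [dfsRec]
      simp only [Nat.cast_succ, hk, if_false, pyCombs, List.foldl_append, List.foldl_map]
      have h1 : ((j : Int) + 1 - 1) = (j : Int) := by ring
      rw [h1, ih j, show (j : Int) + 1 = ((j + 1 : Nat) : Int) from by push_cast; ring, ih (j + 1)]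
      have harg : (fun (b : Int × Option (List String)) (g : List String) =>
            let s := (x :: g).foldl (fun s d => PySem.Set.union s (PySem.Dict.getD (PySem.Dict.mk dict) d ([] : List Int))) union
            let c := PySem.Set.len s
            if c > b.1 then (c, some (chosen ++ x :: g)) else b) =
          (fun b g =>
            let s := g.foldl (fun s d => PySem.Set.union s (PySem.Dict.getD (PySem.Dict.mk dict) d ([] : List Int)))
              (PySem.Set.union union (PySem.Dict.getD (PySem.Dict.mk dict) x ([] : List Int)))
            let c := PySem.Set.len s
            if c > b.1 then (c, some ((chosen ++ [x]) ++ g)) else b) := by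
        funext b g
        simp [List.append_assoc]
      rw [← harg]

-- ===== VERDICT (by name: the statement is the Claim_ definition above) =====
theorem find_max_coverage_spec : Claim_equal_find_max_coverage := by
  intro d2u dlist gs _ hpre
  unfold Spec_find_max_coverage find_max_coverage find_max_coverage_alt
  rw [loopAlt_eq_foldl]
  simp only [List.foldl_cons, List.foldl_nil, List.drop_zero]
  have hgs : gs = (gs.toNat : Int) := (Int.toNat_of_nonneg hpre.1).symm
  rw [hgs, dfsRec_eq_foldl]
  simp [max_eq_left hpre.1]
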